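-- pv_equiv track=rewrite | github.com/ilovebyung/pos | utils/util.py | calculate_split_amounts
-- ===== SOURCE A (Python) =====
-- def calculate_split_amounts(total_amount, split_count):
--     if split_count <= 1:
--         return [total_amount]
--
--     base_amount = total_amount // split_count
--     remainder = total_amount % split_count
--
--     amounts = [base_amount] * split_count
--
--     # Distribute remainder starting from the last amounts
--     for i in range(remainder):
--         amounts[-(i+1)] += 1
--
--     return amounts
-- ===== SOURCE B (Python) =====
-- def calculate_split_amounts(total_amount, split_count):
--     # Iterative peeling: repeatedly take the floor share of what is left as the
--     # next amount; never computes a remainder or distributes extras.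
--     amounts = []
--     remaining = total_amount
--     count = split_count
--     while count > 1:
--         share = remaining // count
--         amounts.append(share)
--         remaining -= share
--         count -= 1
--     amounts.append(remaining)
--     return amounts
-- ===== Notes on version B (the rewrite author's own statement) =====
-- stated objective: alternative
-- what changed: Replaces the divmod-then-distribute-remainder scheme (build a uniform list, then increment the last remainder entries by negative indexing) with an iterative peeling algorithm that never computes a remainder: each step appends the floor share of the amount still remaining and reduces the remaining amount and count, the last share being whatever is left.
import Mathlib
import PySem

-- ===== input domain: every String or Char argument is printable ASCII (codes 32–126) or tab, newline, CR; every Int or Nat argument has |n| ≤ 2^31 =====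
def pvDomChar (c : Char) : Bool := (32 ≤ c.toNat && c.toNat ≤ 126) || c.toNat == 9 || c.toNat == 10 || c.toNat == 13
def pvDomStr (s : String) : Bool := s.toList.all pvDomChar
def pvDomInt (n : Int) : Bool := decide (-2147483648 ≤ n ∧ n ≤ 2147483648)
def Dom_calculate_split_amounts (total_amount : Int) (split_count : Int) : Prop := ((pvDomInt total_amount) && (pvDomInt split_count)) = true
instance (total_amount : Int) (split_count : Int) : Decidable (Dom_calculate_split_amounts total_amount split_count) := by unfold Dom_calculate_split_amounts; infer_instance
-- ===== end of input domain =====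

-- B replaces A's divmod-then-distribute-remainder loop with an iterative peeling
-- algorithm (append the floor share of what is left, reduce amount and count) that
-- never computes a remainder (objective: alternative).

-- ===== PORT A =====
def calculate_split_amounts (total_amount : Int) (split_count : Int) : List Int :=
  if split_count ≤ 1 then [total_amount]
  else
    let base_amount := PySem.Int.floordiv total_amount split_count
    let remainder := PySem.Int.mod total_amount split_count
    let amounts := List.replicate split_count.toNat base_amount  -- [base_amount] * split_count (split_count ≥ 2 here)
    -- for i in range(remainder): amounts[-(i+1)] += 1   (pyGetD/pySetD exact: 0 ≤ i < remainder < split_count = len)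
    (PySem.List.pyRange 0 remainder).foldl
      (fun amounts i =>
        PySem.List.pySetD amounts (-(i+1)) (PySem.List.pyGetD amounts (-(i+1)) 0 + 1))
      amounts

-- ===== PORT B =====
-- the while loop of Source B: state (amounts, remaining, count)
def pvPeelLoop (amounts : List Int) (remaining : Int) (count : Int) : List Int :=
  if 1 < count then
    let share := PySem.Int.floordiv remaining count
    pvPeelLoop (amounts ++ [share]) (remaining - share) (count - 1)
  else amounts ++ [remaining]
termination_by count.toNat
decreasing_by
  rename_i h; omega

def calculate_split_amounts_alt (total_amount : Int) (split_count : Int) : List Int :=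
  pvPeelLoop [] total_amount split_count

-- ===== PRECONDITION & SPEC =====
def Spec_calculate_split_amounts (total_amount : Int) (split_count : Int) (out : List Int) : Prop := out = calculate_split_amounts_alt total_amount split_count
instance (total_amount : Int) (split_count : Int) (out : List Int) : Decidable (Spec_calculate_split_amounts total_amount split_count out) := by unfold Spec_calculate_split_amounts; infer_instance

-- ===== CLAIM (what is proved, stated in full; the proofs are below) =====
def Claim_equal_calculate_split_amounts : Prop := ∀ (total_amount : Int) (split_count : Int), Dom_calculate_split_amounts total_amount split_count → Spec_calculate_split_amounts total_amount split_count (calculate_split_amounts total_amount split_count)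

-- ===== LEMMAS AND PROOFS =====

-- pySetD at a negative in-range index is List.set at length - k (helper; analogue of pyGetD_neg_natCast).
theorem pv_pySetD_neg_natCast {α : Type} (xs : List α) (k : Nat) (v : α) (hk : 0 < k) (hk' : k ≤ xs.length) :
    PySem.List.pySetD xs (-((k : Nat) : Int)) v = xs.set (xs.length - k) v := by
  unfold PySem.List.pySetD PySem.List.pySet? PySem.List.pyIdx?
  have h1 : ¬ (0 : Int) ≤ -((k : Nat) : Int) := by omega
  have h2 : -((xs.length : Nat) : Int) ≤ -((k : Nat) : Int) := by omega
  simp only [h1, if_false, h2, if_true, neg_neg, Int.toNat_natCast,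
    Option.map_some, Option.getD_some]

-- One step of A's loop on the two-block invariant list: sets the last element of the
-- first block to b + 1, growing the second block by one.
theorem pv_step_block (b : Int) (N R : Nat) (hR : R + 1 ≤ N) :
    PySem.List.pySetD (List.replicate (N - R) b ++ List.replicate R (b + 1)) (-(((R : Nat) : Int) + 1))
      (PySem.List.pyGetD (List.replicate (N - R) b ++ List.replicate R (b + 1)) (-(((R : Nat) : Int) + 1)) 0 + 1)
      = List.replicate (N - (R + 1)) b ++ List.replicate (R + 1) (b + 1) := by
  have hlen : (List.replicate (N - R) b ++ List.replicate R (b + 1)).length = N := by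
    simp; omega
  have hcast : (-(((R : Nat) : Int) + 1)) = -(((R + 1 : Nat) : Int)) := by push_cast; ring
  rw [hcast]
  rw [PySem.List.pyGetD_neg_natCast _ (R + 1) 0 (by omega) (by omega)]
  have hget : (List.replicate (N - R) b ++ List.replicate R (b + 1))[(List.replicate (N - R) b ++ List.replicate R (b + 1)).length - (R + 1)]'(by omega)
      = b := by
    rw [List.getElem_append_left (by simp; omega)]
    simp
  rw [hget]
  rw [pv_pySetD_neg_natCast _ (R + 1) _ (by omega) (by omega), hlen]
  have hsplit : List.replicate (N - R) b = List.replicate (N - (R + 1)) b ++ [b] := by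
    have h : N - R = (N - (R + 1)) + 1 := by omega
    rw [h, List.replicate_succ']
  rw [hsplit, List.append_assoc, List.set_append]
  have hi : ¬ (N - (R + 1) < (List.replicate (N - (R + 1)) b).length) := by simp
  rw [if_neg hi]
  have hz : N - (R + 1) - (List.replicate (N - (R + 1)) b).length = 0 := by simp
  rw [hz]
  simp [List.replicate_succ]

-- A's whole loop turns the uniform list into the two-block list.
theorem pv_loop_block (b : Int) (N : Nat) :
    ∀ R : Nat, R ≤ N →
    (PySem.List.pyRange 0 ((R : Nat) : Int)).foldl
      (fun amounts i =>
        PySem.List.pySetD amounts (-(i+1)) (PySem.List.pyGetD amounts (-(i+1)) 0 + 1))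
      (List.replicate N b)
      = List.replicate (N - R) b ++ List.replicate R (b + 1) := by
  intro R
  induction R with
  | zero => intro _; simp [PySem.List.pyRange]
  | succ R ih =>
    intro hR
    have hcast : (((R + 1 : Nat) : Int)) = ((R : Nat) : Int) + 1 := by push_cast; ring
    rw [hcast, PySem.List.pyRange_one_succ_right (by positivity), List.foldl_append]
    rw [ih (by omega)]
    simpa using pv_step_block b N R hR

-- For a positive divisor, mod is the nonnegative remainder.
theorem pv_mod_bounds (t n : Int) (hn : 0 < n) : 0 ≤ PySem.Int.mod t n ∧ PySem.Int.mod t n < n := by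
  rw [PySem.Int.mod_eq_emod_of_pos hn]
  exact ⟨Int.emod_nonneg t (by omega), Int.emod_lt_of_pos t hn⟩

-- For a positive divisor, floordiv/mod are characterized by the Euclidean property.
theorem pv_divmod_unique (t n q r : Int) (hn : 0 < n) (h : t = q * n + r) (hr0 : 0 ≤ r) (hrn : r < n) :
    PySem.Int.floordiv t n = q ∧ PySem.Int.mod t n = r := by
  have hq : PySem.Int.floordiv t n = q := by
    rw [PySem.Int.floordiv_eq_iff_of_pos hn]
    constructor <;> nlinarith
  refine ⟨hq, ?_⟩
  have := PySem.Int.floordiv_mul_add_mod t n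
  rw [hq] at this
  omega

-- B's peeling loop produces the two-block list, by induction on the number of shares.
theorem pv_alt_block : ∀ (m : Nat) (n t : Int) (acc : List Int), n.toNat = m → 1 ≤ n →
    pvPeelLoop acc t n =
      acc ++ (List.replicate (n - PySem.Int.mod t n).toNat (PySem.Int.floordiv t n) ++
        List.replicate (PySem.Int.mod t n).toNat (PySem.Int.floordiv t n + 1)) := by
  intro m
  induction m with
  | zero => intro n t acc hm h1; omega
  | succ m ih =>
    intro n t acc hm h1
    by_cases h : 1 < n
    · -- n ≥ 2
      have hn : 0 < n := by omega
      set q := PySem.Int.floordiv t n with hqdef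
      set r := PySem.Int.mod t n with hrdef
      have ht : t = q * n + r := by
        rw [hqdef, hrdef]; linarith [PySem.Int.floordiv_mul_add_mod t n]
      have hr0 : 0 ≤ r := (pv_mod_bounds t n hn).1
      have hrn : r < n := (pv_mod_bounds t n hn).2
      rw [pvPeelLoop]
      simp only [h, if_true, ← hqdef]
      by_cases hc : r < n - 1
      · -- t - q = q * (n-1) + r, remainder unchanged
        have hdm := pv_divmod_unique (t - q) (n - 1) q r (by omega) (by rw [ht]; ring) hr0 (by omega)
        rw [ih (n - 1) (t - q) (acc ++ [q]) (by omega) (by omega), hdm.1, hdm.2]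
        have h2 : (n - 1 - r).toNat + 1 = (n - r).toNat := by omega
        rw [← h2, List.replicate_succ]
        simp
      · -- r = n - 1: t - q = (q+1) * (n-1) + 0
        have hre : r = n - 1 := by omega
        have hdm := pv_divmod_unique (t - q) (n - 1) (q + 1) 0 (by omega) (by rw [ht, hre]; ring) (by omega) (by omega)
        rw [ih (n - 1) (t - q) (acc ++ [q]) (by omega) (by omega), hdm.1, hdm.2]
        have h2 : (n - r).toNat = 1 := by omega
        have h3 : ((n - 1) - 0).toNat = r.toNat := by omega
        rw [h2, h3]
        simp [List.replicate_succ]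
    · -- n = 1: loop exits, appends remaining
      have hn1 : n = 1 := by omega
      subst hn1
      have hdm := pv_divmod_unique t 1 t 0 (by omega) (by ring) (by omega) (by omega)
      rw [pvPeelLoop]
      rw [hdm.1, hdm.2]
      simp

-- ===== VERDICT (by name: the statement is the Claim_ definition above) =====
theorem calculate_split_amounts_spec : Claim_equal_calculate_split_amounts := by
  intro t n _
  unfold Spec_calculate_split_amounts
  by_cases h : n ≤ 1
  · rw [calculate_split_amounts, calculate_split_amounts_alt, pvPeelLoop]
    simp [h, show ¬ (1 < n) by omega]
  · have hn : 0 < n := by omega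
    rw [calculate_split_amounts_alt, pv_alt_block n.toNat n t [] rfl (by omega), List.nil_append]
    unfold calculate_split_amounts
    simp only [h, if_false]
    have hr0 : 0 ≤ PySem.Int.mod t n := (pv_mod_bounds t n hn).1
    have hrn : PySem.Int.mod t n < n := (pv_mod_bounds t n hn).2
    set r := PySem.Int.mod t n with hr
    have h1 : r = ((r.toNat : Nat) : Int) := by omega
    have h2 : (n - r).toNat = n.toNat - r.toNat := by omega
    have h3 : r.toNat ≤ n.toNat := by omega
    rw [h2]
    calc (PySem.List.pyRange 0 r).foldl
          (fun amounts i =>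
            PySem.List.pySetD amounts (-(i+1)) (PySem.List.pyGetD amounts (-(i+1)) 0 + 1))
          (List.replicate n.toNat (PySem.Int.floordiv t n))
        = (PySem.List.pyRange 0 ((r.toNat : Nat) : Int)).foldl
          (fun amounts i =>
            PySem.List.pySetD amounts (-(i+1)) (PySem.List.pyGetD amounts (-(i+1)) 0 + 1))
          (List.replicate n.toNat (PySem.Int.floordiv t n)) := by rw [← h1]
      _ = _ := pv_loop_block (PySem.Int.floordiv t n) n.toNat r.toNat h3
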